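-- pv_equiv track=rewrite | github.com/chorogrim/verde | algorithm/bot_task.py | solution
-- ===== SOURCE A (Python) =====
-- def calculate_time(size, repeat):
--
--     # 만약 반복 횟수가 0인 경우를 처리
--     if repeat == 0:
--
--         # 작업을 수행하는데 걸리는 시간 1
--         return 1
--
--     # 작업의 크기를 주어진 반복 횟수만큼 거듭제곱한 값을 반환
--     # (= 작업을 반복하여 수행할 때 걸리는 시간을 계산)
--     return size ** repeat
--
-- def solution(sizes, limits, tasks):
--
--     # 결과를 담을 빈 리스트 선언
--     result = []
--
--     # 각 로봇에 대한 작업을 반복 (zip 함수를 사용)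
--     # sizes, limits, tasks 배열들을 반복하며 각 로봇의 대한 정보를 가져오기
--     for size, limit, task in zip(sizes, limits, tasks):
--
--         # 총 total_time = 0 으로 초기화
--         # (로봇의 작업을 수행하는데 필요한 시간을 저장)
--         total_time = 0
--
--         # 작업 문자열을 한 글자씩 반복
--         for char in str(task):
--
--             # 숫자인지 아닌지 확인하는 함수
--             if char.isdigit():
--
--                 # 숫자라면, 글자를 정수로 변환하여 해당 작업을 수행하는데 필요한 시간을 계산하고 total_time에 더함
--                 total_time += calculate_time(size, int(char))
--
--         # 주어진 시간 내에 작업을 끝낼 수 있는지 확인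
--         if total_time <= limit:
--
--             # 작업 완료할 수 있다면 result에 1 추가
--             result.append(1)
--
--         # 그렇지 않다면
--         else:
--             # result에 0을 추가
--             result.append(0)
--
--     # result 리스트를 반환하여 각 로봇의 작업 완료 여부를 나타내는 결과를 얻기
--     return result
-- ===== SOURCE B (Python) =====
-- def solution(sizes, limits, tasks):
--     # Arithmetic digit extraction: no str() conversion at all.
--     # The decimal digits of task are obtained with % 10 and // 10 on abs(task);
--     # each digit d contributes size ** d (size ** 0 == 1 covers the 0 digit).
--     result = []
--     for size, limit, task in zip(sizes, limits, tasks):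
--         n = abs(task)
--         total = size ** (n % 10)
--         n //= 10
--         while n:
--             total += size ** (n % 10)
--             n //= 10
--         result.append(1 if total <= limit else 0)
--     return result
-- ===== Notes on version B (the rewrite author's own statement) =====
-- stated objective: faster
-- what changed: Replaces A's str(task) character scan with isdigit filtering and a repeat==0 helper by pure arithmetic digit extraction: abs(task) is decomposed with % 10 and // 10 in a while-loop, each digit d adding size ** d (size ** 0 == 1 absorbs the special case).
import Mathlib
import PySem

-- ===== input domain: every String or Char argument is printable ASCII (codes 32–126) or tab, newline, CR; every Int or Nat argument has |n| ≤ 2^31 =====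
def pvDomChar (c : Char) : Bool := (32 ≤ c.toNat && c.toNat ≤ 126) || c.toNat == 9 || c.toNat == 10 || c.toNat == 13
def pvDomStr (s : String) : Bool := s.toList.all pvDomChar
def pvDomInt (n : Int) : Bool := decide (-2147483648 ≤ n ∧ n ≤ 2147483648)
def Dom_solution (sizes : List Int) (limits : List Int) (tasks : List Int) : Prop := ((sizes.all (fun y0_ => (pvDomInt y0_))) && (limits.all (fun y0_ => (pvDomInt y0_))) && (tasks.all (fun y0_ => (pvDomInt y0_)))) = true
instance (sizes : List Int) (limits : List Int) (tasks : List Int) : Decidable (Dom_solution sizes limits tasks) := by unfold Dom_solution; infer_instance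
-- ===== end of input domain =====

-- B replaces A's str(task) character scan (with its isdigit filter and repeat==0 helper) by pure
-- arithmetic digit extraction on abs(task) with % 10 and // 10; measurably faster by a constant factor.

-- ===== PORT A =====

-- int(char) for a character that passed isdigit() (ASCII '0'..'9' — exact there;
-- str(task) only ever contains '-' and ASCII digits)
def digitVal (c : Char) : Int := (c.toNat : Int) - 48

def calculate_time (size : Int) (rep : Int) : Int :=
  if rep = 0 then 1
  else size ^ rep.toNat  -- size ** rep; rep is a digit value 0..9, so int exponentiation is exact

def solution (sizes : List Int) (limits : List Int) (tasks : List Int) : List Int :=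
  (sizes.zip (limits.zip tasks)).foldl (fun result slt =>
    let total_time := (PySem.Int.toChars slt.2.2).foldl
      (fun acc c => if PySem.Chars.isdigit c then acc + calculate_time slt.1 (digitVal c) else acc) 0
    if total_time ≤ slt.2.1 then result ++ [1] else result ++ [0]) []

-- ===== PORT B =====

-- the 'while n: total += size ** (n % 10); n //= 10' loop of Source B (nonnegative n, so
-- Python's // and % agree with Nat division)
def digitWhile (size : Int) (n : Nat) (total : Int) : Int :=
  if n = 0 then total else digitWhile size (n / 10) (total + size ^ (n % 10))
termination_by n
decreasing_by exact Nat.div_lt_self (Nat.pos_of_ne_zero (by assumption)) (by omega)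

def solution_alt (sizes : List Int) (limits : List Int) (tasks : List Int) : List Int :=
  (sizes.zip (limits.zip tasks)).foldl (fun result slt =>
    let n := slt.2.2.natAbs                    -- n = abs(task)
    let total := slt.1 ^ (n % 10)              -- total = size ** (n % 10)
    let total := digitWhile slt.1 (n / 10) total
    result ++ [if total ≤ slt.2.1 then (1 : Int) else 0]) []

-- ===== PRECONDITION & SPEC =====
def Spec_solution (sizes : List Int) (limits : List Int) (tasks : List Int) (out : List Int) : Prop := out = solution_alt sizes limits tasks
instance (sizes : List Int) (limits : List Int) (tasks : List Int) (out : List Int) : Decidable (Spec_solution sizes limits tasks out) := by unfold Spec_solution; infer_instance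

-- ===== CLAIM =====
def Claim_equal_solution : Prop := ∀ (sizes : List Int) (limits : List Int) (tasks : List Int), Dom_solution sizes limits tasks → Spec_solution sizes limits tasks (solution sizes limits tasks)

-- ===== LEMMAS AND PROOFS =====

-- decimal digit characters of m, big-endian (what Nat.toDigits 10 produces)
def decChars (m : Nat) : List Char :=
  if m < 10 then [Nat.digitChar m] else decChars (m / 10) ++ [Nat.digitChar (m % 10)]
termination_by m
decreasing_by exact Nat.div_lt_self (by omega) (by omega)

-- size^digit summed over the decimal digits of m (digits of 0 = [0])
def digitSum (size : Int) (m : Nat) : Int :=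
  if m < 10 then size ^ m else digitSum size (m / 10) + size ^ (m % 10)
termination_by m
decreasing_by exact Nat.div_lt_self (by omega) (by omega)

-- like digitSum but contributing nothing for m = 0 (the while-loop's view)
def digitSum0 (size : Int) (m : Nat) : Int :=
  if m = 0 then 0 else digitSum0 size (m / 10) + size ^ (m % 10)
termination_by m
decreasing_by exact Nat.div_lt_self (Nat.pos_of_ne_zero (by assumption)) (by omega)

theorem toDigitsCore_eq_decChars (f : Nat) : ∀ (m : Nat) (acc : List Char), m < 10 ^ f → 0 < f →
    Nat.toDigitsCore 10 f m acc = decChars m ++ acc := by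
  induction f with
  | zero => intro m acc _ hf; omega
  | succ f ih =>
    intro m acc hm _
    rw [Nat.toDigitsCore]
    by_cases h : m / 10 = 0
    · have hm10 : m < 10 := by omega
      rw [if_pos h]
      conv_rhs => rw [decChars, if_pos hm10]
      rw [Nat.mod_eq_of_lt hm10]
      rfl
    · have hf : 0 < f := by
        rcases Nat.eq_zero_or_pos f with h0 | h0
        · subst h0; rw [pow_one] at hm; omega
        · exact h0
      have hdiv : m / 10 < 10 ^ f := Nat.div_lt_of_lt_mul (by rw [pow_succ] at hm; omega)
      rw [if_neg h, ih (m / 10) _ hdiv hf]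
      conv_rhs => rw [decChars, if_neg (by omega)]
      rw [List.append_assoc]
      rfl

theorem toDigits_eq_decChars (m : Nat) : Nat.toDigits 10 m = decChars m := by
  have hm : m < 10 ^ (m + 1) := by
    calc m < 10 ^ m := Nat.lt_pow_self (by omega)
    _ ≤ 10 ^ (m + 1) := Nat.pow_le_pow_right (by omega) (by omega)
  simpa [Nat.toDigits] using toDigitsCore_eq_decChars (m + 1) m [] hm (by omega)

theorem digitChar_spec (d : Nat) (hd : d < 10) :
    PySem.Chars.isdigit (Nat.digitChar d) = true ∧ digitVal (Nat.digitChar d) = (d : Int) := by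
  interval_cases d <;> exact ⟨by decide, by decide⟩

theorem calculate_time_eq (size rep : Int) : calculate_time size rep = size ^ rep.toNat := by
  unfold calculate_time
  split_ifs with h
  · simp [h]
  · rfl

-- A's character loop over the decimal digit characters computes digitSum
theorem foldl_decChars (size : Int) (m : Nat) : ∀ (t : Int),
    (decChars m).foldl
      (fun acc c => if PySem.Chars.isdigit c then acc + calculate_time size (digitVal c) else acc) t
      = t + digitSum size m := by
  induction m using Nat.strong_induction_on with
  | _ m ih =>
    intro t
    by_cases hm : m < 10
    · obtain ⟨h1, h2⟩ := digitChar_spec m hm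
      rw [decChars, if_pos hm, digitSum, if_pos hm, List.foldl_cons, List.foldl_nil, if_pos h1,
        h2, calculate_time_eq, Int.toNat_natCast]
    · obtain ⟨h1, h2⟩ := digitChar_spec (m % 10) (Nat.mod_lt _ (by omega))
      rw [decChars, if_neg hm, digitSum, if_neg hm, List.foldl_append,
        ih (m / 10) (Nat.div_lt_self (by omega) (by omega)), List.foldl_cons, List.foldl_nil,
        if_pos h1, h2, calculate_time_eq, Int.toNat_natCast, add_assoc]

-- the while-loop adds digitSum0 of its argument
theorem digitWhile_eq (size : Int) (n : Nat) : ∀ (t : Int),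
    digitWhile size n t = t + digitSum0 size n := by
  induction n using Nat.strong_induction_on with
  | _ n ih =>
    intro t
    by_cases hn : n = 0
    · rw [digitWhile, if_pos hn, digitSum0, if_pos hn, add_zero]
    · rw [digitWhile, if_neg hn, digitSum0, if_neg hn,
        ih (n / 10) (Nat.div_lt_self (Nat.pos_of_ne_zero hn) (by omega))]
      ring

theorem digitSum_split (size : Int) (m : Nat) :
    digitSum size m = size ^ (m % 10) + digitSum0 size (m / 10) := by
  induction m using Nat.strong_induction_on with
  | _ m ih =>
    by_cases hm : m < 10
    · rw [digitSum, if_pos hm, digitSum0, if_pos (by omega), Nat.mod_eq_of_lt hm, add_zero]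
    · rw [digitSum, if_neg hm, ih (m / 10) (Nat.div_lt_self (by omega) (by omega))]
      conv_rhs => rw [digitSum0, if_neg (show ¬ m / 10 = 0 by omega)]
      ring

-- both per-robot totals coincide
theorem totals_eq (size t : Int) :
    (PySem.Int.toChars t).foldl
      (fun acc c => if PySem.Chars.isdigit c then acc + calculate_time size (digitVal c) else acc) 0
      = digitWhile size (t.natAbs / 10) (size ^ (t.natAbs % 10)) := by
  rw [digitWhile_eq, ← digitSum_split]
  unfold PySem.Int.toChars
  split_ifs with h
  · rw [List.foldl_cons, if_neg (by decide), toDigits_eq_decChars, foldl_decChars, zero_add]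
  · rw [toDigits_eq_decChars, foldl_decChars, zero_add,
      show t.toNat = t.natAbs by omega]

-- ===== VERDICT =====
theorem solution_spec : Claim_equal_solution := by
  intro sizes limits tasks _
  unfold Spec_solution solution solution_alt
  have hb : (fun (result : List Int) (slt : Int × Int × Int) =>
      let total_time := (PySem.Int.toChars slt.2.2).foldl
        (fun acc c => if PySem.Chars.isdigit c then acc + calculate_time slt.1 (digitVal c) else acc) 0
      if total_time ≤ slt.2.1 then result ++ [1] else result ++ [0])
      = (fun result slt => result ++ [if (PySem.Int.toChars slt.2.2).foldl
        (fun acc c => if PySem.Chars.isdigit c then acc + calculate_time slt.1 (digitVal c) else acc) 0 ≤ slt.2.1 then (1:Int) else 0]) := by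
    funext r slt
    dsimp only
    split_ifs <;> rfl
  rw [hb, PySem.List.foldl_append_singleton_eq_map, PySem.List.foldl_append_singleton_eq_map,
    List.nil_append, List.nil_append]
  exact List.map_congr_left (fun slt _ => by rw [totals_eq])
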